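-- pv_equiv track=rewrite | github.com/Ready2k/Project3 | app/services/jira_diagnostics.py | _get_feature_support
-- ===== SOURCE A (Python) =====
-- from typing import Dict, List, Optional, Any, Tuple
--
-- def _get_feature_support(version: str) -> Dict[str, bool]:
--     """Get feature support based on Jira version."""
--     try:
--         version_parts = [int(x) for x in version.split('.')]
--         major = version_parts[0] if version_parts else 0
--         minor = version_parts[1] if len(version_parts) > 1 else 0
--
--         return {
--             "rest_api_v3": major >= 8,
--             "personal_access_tokens": major > 8 or (major == 8 and minor >= 14),
--             "modern_authentication": major >= 8,
--             "advanced_search": major >= 7,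
--             "webhooks": major >= 7,
--             "agile_rest_api": major >= 7
--         }
--
--     except Exception:
--         # Default feature support for unknown versions
--         return {
--             "rest_api_v3": True,
--             "personal_access_tokens": True,
--             "modern_authentication": True,
--             "advanced_search": True,
--             "webhooks": True,
--             "agile_rest_api": True
--         }
-- ===== SOURCE B (Python) =====
-- # Era classification: instead of computing six per-feature booleans, classify
-- # the version into one of four "eras" (pre-7, 7.x, 8.0-8.13, 8.14+) by walking
-- # a sorted boundary list, then return a copy of that era's precomputed answer.
-- _BOUNDARIES = [(7, None), (8, None), (8, 14)]  # (major, minimum minor or None = any)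
--
-- _ERA_TABLES = [
--     {"rest_api_v3": False, "personal_access_tokens": False,
--      "modern_authentication": False, "advanced_search": False,
--      "webhooks": False, "agile_rest_api": False},
--     {"rest_api_v3": False, "personal_access_tokens": False,
--      "modern_authentication": False, "advanced_search": True,
--      "webhooks": True, "agile_rest_api": True},
--     {"rest_api_v3": True, "personal_access_tokens": False,
--      "modern_authentication": True, "advanced_search": True,
--      "webhooks": True, "agile_rest_api": True},
--     {"rest_api_v3": True, "personal_access_tokens": True,
--      "modern_authentication": True, "advanced_search": True,
--      "webhooks": True, "agile_rest_api": True},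
-- ]
--
-- def _get_feature_support(version: str) -> dict:
--     """Get feature support based on Jira version."""
--     try:
--         parts = [int(x) for x in version.split('.')]
--     except ValueError:
--         return dict(_ERA_TABLES[3])  # unknown version: assume everything works
--     major = parts[0] if parts else 0
--     minor = parts[1] if len(parts) > 1 else 0
--     era = 0
--     for req_major, req_minor in _BOUNDARIES:
--         if major > req_major or (major == req_major and
--                                  (req_minor is None or minor >= req_minor)):
--             era += 1
--         else:
--             break
--     return dict(_ERA_TABLES[era])
-- ===== Notes on version B (the rewrite author's own statement) =====
-- stated objective: alternative
-- what changed: Replaces the six per-feature boolean expressions by an era classification: a short loop over a sorted boundary list assigns the version to one of four eras, and the answer is a copy of that era's precomputed flag dict.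
import Mathlib
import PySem

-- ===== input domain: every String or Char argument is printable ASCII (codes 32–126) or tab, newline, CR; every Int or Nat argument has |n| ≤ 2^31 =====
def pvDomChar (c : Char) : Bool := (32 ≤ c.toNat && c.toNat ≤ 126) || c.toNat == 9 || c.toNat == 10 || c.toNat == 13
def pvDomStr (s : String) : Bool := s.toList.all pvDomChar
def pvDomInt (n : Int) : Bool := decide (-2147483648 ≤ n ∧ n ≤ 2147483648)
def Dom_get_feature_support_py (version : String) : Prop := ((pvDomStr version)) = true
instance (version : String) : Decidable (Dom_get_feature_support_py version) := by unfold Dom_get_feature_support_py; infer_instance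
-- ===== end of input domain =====

-- B classifies the version into one of four eras via a boundary-list loop and
-- returns a copy of that era's precomputed flag table (alternative, same cost).

-- ===== PORT A =====
def get_feature_support_py (version : String) : List (String × Bool) :=
  -- try: [int(x) for x in version.split('.')] — none = some int(x) raised ValueError
  -- (split with a nonempty separator is exact as Chars.splitOn)
  match (PySem.Chars.splitOn version.toList ['.']).mapM PySem.Int.ofChars? with
  | none =>
    -- except branch: default all-True dict
    [("rest_api_v3", true), ("personal_access_tokens", true),
     ("modern_authentication", true), ("advanced_search", true),
     ("webhooks", true), ("agile_rest_api", true)]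
  | some version_parts =>
    let major : Int := if version_parts.isEmpty then 0 else version_parts.headD 0
    let minor : Int := if version_parts.length > 1 then version_parts.getD 1 0 else 0
    [("rest_api_v3", decide (major ≥ 8)),
     ("personal_access_tokens", decide (major > 8) || (decide (major = 8) && decide (minor ≥ 14))),
     ("modern_authentication", decide (major ≥ 8)),
     ("advanced_search", decide (major ≥ 7)),
     ("webhooks", decide (major ≥ 7)),
     ("agile_rest_api", decide (major ≥ 7))]

-- ===== PORT B =====
def pvBoundaries : List (Int × Option Int) := [(7, none), (8, none), (8, some 14)]

def pvEraTables : List (List (String × Bool)) :=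
  [[("rest_api_v3", false), ("personal_access_tokens", false),
    ("modern_authentication", false), ("advanced_search", false),
    ("webhooks", false), ("agile_rest_api", false)],
   [("rest_api_v3", false), ("personal_access_tokens", false),
    ("modern_authentication", false), ("advanced_search", true),
    ("webhooks", true), ("agile_rest_api", true)],
   [("rest_api_v3", true), ("personal_access_tokens", false),
    ("modern_authentication", true), ("advanced_search", true),
    ("webhooks", true), ("agile_rest_api", true)],
   [("rest_api_v3", true), ("personal_access_tokens", true),
    ("modern_authentication", true), ("advanced_search", true),
    ("webhooks", true), ("agile_rest_api", true)]]

-- the boundary loop with early break, as structural recursion over the list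
def pvEraLoop (bounds : List (Int × Option Int)) (major minor : Int) (era : Nat) : Nat :=
  match bounds with
  | [] => era
  | (reqMajor, reqMinor) :: rest =>
    if decide (major > reqMajor) || (decide (major = reqMajor) &&
        (match reqMinor with | none => true | some m => decide (minor ≥ m))) then
      pvEraLoop rest major minor (era + 1)
    else era

def get_feature_support_py_alt (version : String) : List (String × Bool) :=
  match (PySem.Chars.splitOn version.toList ['.']).mapM PySem.Int.ofChars? with
  | none => pvEraTables.getD 3 []
  | some parts =>
    let major : Int := if parts.isEmpty then 0 else parts.headD 0
    let minor : Int := if parts.length > 1 then parts.getD 1 0 else 0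
    pvEraTables.getD (pvEraLoop pvBoundaries major minor 0) []

-- ===== PRECONDITION & SPEC =====
def Spec_get_feature_support_py (version : String) (out : List (String × Bool)) : Prop := out = get_feature_support_py_alt version
instance (version : String) (out : List (String × Bool)) : Decidable (Spec_get_feature_support_py version out) := by unfold Spec_get_feature_support_py; infer_instance

-- ===== CLAIM (what is proved, stated in full; the proofs are below) =====
def Claim_equal_get_feature_support_py : Prop := ∀ (version : String), Dom_get_feature_support_py version → Spec_get_feature_support_py version (get_feature_support_py version)

-- ===== LEMMAS AND PROOFS =====
theorem era_table_eq (major minor : Int) :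
    pvEraTables.getD (pvEraLoop pvBoundaries major minor 0) [] =
    [("rest_api_v3", decide (major ≥ 8)),
     ("personal_access_tokens", decide (major > 8) || (decide (major = 8) && decide (minor ≥ 14))),
     ("modern_authentication", decide (major ≥ 8)),
     ("advanced_search", decide (major ≥ 7)),
     ("webhooks", decide (major ≥ 7)),
     ("agile_rest_api", decide (major ≥ 7))] := by
  simp only [pvBoundaries, pvEraLoop]
  split_ifs <;> simp_all [pvEraTables] <;> omega

-- ===== VERDICT (by name: the statement is the Claim_ definition above) =====
theorem get_feature_support_py_spec : Claim_equal_get_feature_support_py := by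
  intro version _
  unfold Spec_get_feature_support_py get_feature_support_py get_feature_support_py_alt
  cases h : (PySem.Chars.splitOn version.toList ['.']).mapM PySem.Int.ofChars? with
  | none => simp [pvEraTables]
  | some parts => exact (era_table_eq _ _).symm
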